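-- pv_equiv track=rewrite | github.com/mcroomp/windpower | simulation/analysis/flight_log.py | _categorize_statustext
-- ===== SOURCE A (Python) =====
-- def _categorize_statustext(text: str) -> tuple:
--     """Return (category, severity) for a STATUSTEXT string."""
--     tl = text.lower()
--     if "rawes" in tl:
--         cat = "RAWES"
--     elif any(k in tl for k in ("gps", "origin set", "relposned", "fix")):
--         cat = "GPS"
--     elif any(k in tl for k in ("ekf", "yaw", "compass", "ahrs", "tilt align")):
--         cat = "EKF"
--     elif any(k in tl for k in ("armed", "disarm")):
--         cat = "ARM"
--     else:
--         cat = "INFO"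
--
--     if any(k in tl for k in ("emergency", "abort", "fail", "crash")):
--         sev = "ERROR"
--     elif any(k in tl for k in ("glitch", "reset", "error", "lost")):
--         sev = "WARN"
--     elif any(k in tl for k in ("using gps", "origin set", "aligned",
--                                 "healthy", "initialised")):
--         sev = "OK"
--     else:
--         sev = "INFO"
--     return cat, sev
-- ===== SOURCE B (Python) =====
-- # B: flat keyword->(rank,label) index scanned once per dimension, keeping the
-- # best (lowest-rank) match in an accumulator, instead of staged if/elif chains.
-- _CAT_INDEX = {
--     "rawes": (0, "RAWES"),
--     "gps": (1, "GPS"), "origin set": (1, "GPS"),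
--     "relposned": (1, "GPS"), "fix": (1, "GPS"),
--     "ekf": (2, "EKF"), "yaw": (2, "EKF"), "compass": (2, "EKF"),
--     "ahrs": (2, "EKF"), "tilt align": (2, "EKF"),
--     "armed": (3, "ARM"), "disarm": (3, "ARM"),
-- }
-- _SEV_INDEX = {
--     "emergency": (0, "ERROR"), "abort": (0, "ERROR"),
--     "fail": (0, "ERROR"), "crash": (0, "ERROR"),
--     "glitch": (1, "WARN"), "reset": (1, "WARN"),
--     "error": (1, "WARN"), "lost": (1, "WARN"),
--     "using gps": (2, "OK"), "origin set": (2, "OK"), "aligned": (2, "OK"),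
--     "healthy": (2, "OK"), "initialised": (2, "OK"),
-- }
--
-- def _best_match(index, tl):
--     best = None
--     for kw, (rank, label) in index.items():
--         if kw in tl and (best is None or rank < best[0]):
--             best = (rank, label)
--     return best[1] if best is not None else "INFO"
--
-- def _categorize_statustext(text: str) -> tuple:
--     tl = text.lower()
--     return _best_match(_CAT_INDEX, tl), _best_match(_SEV_INDEX, tl)
-- ===== Notes on version B (the rewrite author's own statement) =====
-- stated objective: alternative
-- what changed: Replaced the two staged if/elif keyword chains by a flat keyword->(rank,label) index scanned in one pass per dimension with a min-rank accumulator selecting the best match.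
import Mathlib
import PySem

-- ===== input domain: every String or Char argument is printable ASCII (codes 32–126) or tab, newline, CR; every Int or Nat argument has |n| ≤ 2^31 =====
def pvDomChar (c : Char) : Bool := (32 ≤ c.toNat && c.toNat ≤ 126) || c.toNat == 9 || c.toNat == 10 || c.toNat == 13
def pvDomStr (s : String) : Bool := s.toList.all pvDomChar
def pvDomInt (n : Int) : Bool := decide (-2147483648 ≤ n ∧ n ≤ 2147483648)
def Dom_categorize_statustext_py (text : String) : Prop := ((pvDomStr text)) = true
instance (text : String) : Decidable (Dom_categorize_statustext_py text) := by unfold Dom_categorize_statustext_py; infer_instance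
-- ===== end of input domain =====

-- B replaces the staged if/elif keyword chains by a flat keyword->(rank,label) index scanned with a min-rank accumulator (alternative decomposition; same behaviour).


-- ===== PORT A =====
def categorize_statustext_py (text : String) : String × String :=
  let tl := PySem.Str.lower text
  let cat :=
    if PySem.Str.isIn "rawes" tl then "RAWES"
    else if ["gps", "origin set", "relposned", "fix"].any (fun k => PySem.Str.isIn k tl) then "GPS"
    else if ["ekf", "yaw", "compass", "ahrs", "tilt align"].any (fun k => PySem.Str.isIn k tl) then "EKF"
    else if ["armed", "disarm"].any (fun k => PySem.Str.isIn k tl) then "ARM"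
    else "INFO"
  let sev :=
    if ["emergency", "abort", "fail", "crash"].any (fun k => PySem.Str.isIn k tl) then "ERROR"
    else if ["glitch", "reset", "error", "lost"].any (fun k => PySem.Str.isIn k tl) then "WARN"
    else if ["using gps", "origin set", "aligned", "healthy", "initialised"].any (fun k => PySem.Str.isIn k tl) then "OK"
    else "INFO"
  (cat, sev)

-- ===== PORT B =====
-- flat keyword -> (rank, label) indexes (the Python dicts, in insertion order)
def pvCatIndex : List (String × Nat × String) :=
  [("rawes", 0, "RAWES"),
   ("gps", 1, "GPS"), ("origin set", 1, "GPS"),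
   ("relposned", 1, "GPS"), ("fix", 1, "GPS"),
   ("ekf", 2, "EKF"), ("yaw", 2, "EKF"), ("compass", 2, "EKF"),
   ("ahrs", 2, "EKF"), ("tilt align", 2, "EKF"),
   ("armed", 3, "ARM"), ("disarm", 3, "ARM")]

def pvSevIndex : List (String × Nat × String) :=
  [("emergency", 0, "ERROR"), ("abort", 0, "ERROR"),
   ("fail", 0, "ERROR"), ("crash", 0, "ERROR"),
   ("glitch", 1, "WARN"), ("reset", 1, "WARN"),
   ("error", 1, "WARN"), ("lost", 1, "WARN"),
   ("using gps", 2, "OK"), ("origin set", 2, "OK"), ("aligned", 2, "OK"),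
   ("healthy", 2, "OK"), ("initialised", 2, "OK")]

-- the loop of _best_match: keep the lowest-rank match seen so far
def pvBestLoop (tl : String) (best : Option (Nat × String)) :
    List (String × Nat × String) → Option (Nat × String)
  | [] => best
  | (kw, rank, label) :: rest =>
    pvBestLoop tl
      (if PySem.Str.isIn kw tl &&
          (match best with | none => true | some (r, _) => decide (rank < r))
       then some (rank, label) else best) rest

def pvBestMatch (index : List (String × Nat × String)) (tl : String) : String :=
  match pvBestLoop tl none index with
  | some (_, label) => label
  | none => "INFO"

def categorize_statustext_py_alt (text : String) : String × String :=
  let tl := PySem.Str.lower text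
  (pvBestMatch pvCatIndex tl, pvBestMatch pvSevIndex tl)

-- ===== PRECONDITION & SPEC =====
def Spec_categorize_statustext_py (text : String) (out : String × String) : Prop := out = categorize_statustext_py_alt text
instance (text : String) (out : String × String) : Decidable (Spec_categorize_statustext_py text out) := by unfold Spec_categorize_statustext_py; infer_instance

-- ===== CLAIM =====
def Claim_equal_categorize_statustext_py : Prop := ∀ (text : String), Dom_categorize_statustext_py text → Spec_categorize_statustext_py text (categorize_statustext_py text)

-- ===== LEMMAS AND PROOFS =====

-- once the accumulator holds a match whose rank is ≤ every remaining rank, it never changes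
lemma pvBestLoop_keep (tl : String) (r : Nat) (l : String)
    (idx : List (String × Nat × String)) (h : ∀ e ∈ idx, r ≤ e.2.1) :
    pvBestLoop tl (some (r, l)) idx = some (r, l) := by
  induction idx with
  | nil => rfl
  | cons e rest ih =>
    obtain ⟨kw, rank, label⟩ := e
    have hr : ¬ rank < r := Nat.not_lt.mpr (h _ List.mem_cons_self)
    simp only [pvBestLoop, hr, decide_false, Bool.and_false]
    exact ih (fun e he => h e (List.mem_cons_of_mem _ he))

-- on an index with nondecreasing ranks, the min-rank scan returns the FIRST match
lemma pvBestLoop_none_eq_find (tl : String) (idx : List (String × Nat × String))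
    (h : idx.Pairwise (fun a b => a.2.1 ≤ b.2.1)) :
    pvBestLoop tl none idx
      = (idx.find? (fun e => PySem.Str.isIn e.1 tl)).map (fun e => e.2) := by
  induction idx with
  | nil => rfl
  | cons e rest ih =>
    obtain ⟨kw, rank, label⟩ := e
    obtain ⟨hhead, htail⟩ := List.pairwise_cons.mp h
    cases hk : PySem.Str.isIn kw tl with
    | true =>
      simp only [pvBestLoop, List.find?, hk, Bool.and_true, if_true, Option.map_some]
      exact pvBestLoop_keep tl rank label rest (fun e he => hhead e he)
    | false =>
      simp only [pvBestLoop, List.find?, hk, Bool.false_and, Bool.false_eq_true, if_false]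
      exact ih htail

-- ===== VERDICT =====
theorem categorize_statustext_py_spec : Claim_equal_categorize_statustext_py := by
  intro text _
  unfold Spec_categorize_statustext_py categorize_statustext_py categorize_statustext_py_alt
    pvBestMatch
  simp only [List.any_cons, List.any_nil, Bool.or_false]
  rw [pvBestLoop_none_eq_find _ _ (by decide), pvBestLoop_none_eq_find _ _ (by decide)]
  generalize PySem.Str.lower text = tl
  unfold pvCatIndex pvSevIndex
  simp only [List.find?]
  generalize PySem.Str.isIn "rawes" tl = b0
  generalize PySem.Str.isIn "gps" tl = b1
  generalize PySem.Str.isIn "origin set" tl = b2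
  generalize PySem.Str.isIn "relposned" tl = b3
  generalize PySem.Str.isIn "fix" tl = b4
  generalize PySem.Str.isIn "ekf" tl = b5
  generalize PySem.Str.isIn "yaw" tl = b6
  generalize PySem.Str.isIn "compass" tl = b7
  generalize PySem.Str.isIn "ahrs" tl = b8
  generalize PySem.Str.isIn "tilt align" tl = b9
  generalize PySem.Str.isIn "armed" tl = b10
  generalize PySem.Str.isIn "disarm" tl = b11
  generalize PySem.Str.isIn "emergency" tl = b12
  generalize PySem.Str.isIn "abort" tl = b13
  generalize PySem.Str.isIn "fail" tl = b14
  generalize PySem.Str.isIn "crash" tl = b15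
  generalize PySem.Str.isIn "glitch" tl = b16
  generalize PySem.Str.isIn "reset" tl = b17
  generalize PySem.Str.isIn "error" tl = b18
  generalize PySem.Str.isIn "lost" tl = b19
  generalize PySem.Str.isIn "using gps" tl = b20
  generalize PySem.Str.isIn "aligned" tl = b21
  generalize PySem.Str.isIn "healthy" tl = b22
  generalize PySem.Str.isIn "initialised" tl = b23
  rw [Prod.mk.injEq]
  refine ⟨?_, ?_⟩
  · revert b0 b1 b2 b3 b4 b5 b6 b7 b8 b9 b10 b11; decide
  · revert b2 b12 b13 b14 b15 b16 b17 b18 b19 b20 b21 b22 b23; decide
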